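-- pv_equiv track=rewrite | github.com/AdrianKoczurUEK/Ceneo-Web-Scrapper | graph.py | get_recommends
-- ===== SOURCE A (Python) =====
-- def get_recommends(json):
--     recommends = {
--         'Polecam': 0,
--         'Nie polecam': 0
--     }
--
--     for rev in json['item_reviews']:
--         try:
--             recommends[rev['recommended']]+=1
--         except:
--             pass
--     return recommends
-- ===== SOURCE B (Python) =====
-- def get_recommends(json):
--     revs = list(json['item_reviews'])
--
--     def tally(lo, hi):
--         # divide-and-conquer count of the two categories over revs[lo:hi]
--         if hi - lo == 0:
--             return (0, 0)
--         if hi - lo == 1: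
--             try:
--                 v = revs[lo]['recommended']
--             except:
--                 return (0, 0)
--             return (int(v == 'Polecam'), int(v == 'Nie polecam'))
--         mid = (lo + hi) // 2
--         p1, n1 = tally(lo, mid)
--         p2, n2 = tally(mid, hi)
--         return (p1 + p2, n1 + n2)
--
--     p, n = tally(0, len(revs))
--     return {'Polecam': p, 'Nie polecam': n}
-- ===== Notes on version B (the rewrite author's own statement) =====
-- stated objective: alternative
-- what changed: Replaces A's single left-to-right dict-increment loop by a divide-and-conquer recursion: the review list is split in halves, each half's (Polecam, Nie polecam) pair of counters is computed recursively and the pairs are summed; the dict is built only at the end from the two counters.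
import Mathlib
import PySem

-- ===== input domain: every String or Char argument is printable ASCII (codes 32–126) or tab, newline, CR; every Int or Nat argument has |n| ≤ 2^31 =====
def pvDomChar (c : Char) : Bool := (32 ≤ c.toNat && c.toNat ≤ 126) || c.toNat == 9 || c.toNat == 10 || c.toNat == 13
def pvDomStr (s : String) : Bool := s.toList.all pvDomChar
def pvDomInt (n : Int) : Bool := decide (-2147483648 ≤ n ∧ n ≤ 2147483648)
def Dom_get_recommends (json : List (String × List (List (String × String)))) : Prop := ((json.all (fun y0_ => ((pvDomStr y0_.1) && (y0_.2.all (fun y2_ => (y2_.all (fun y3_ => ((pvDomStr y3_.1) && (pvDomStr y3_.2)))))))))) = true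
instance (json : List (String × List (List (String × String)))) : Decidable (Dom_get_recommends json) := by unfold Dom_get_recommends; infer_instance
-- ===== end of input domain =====

-- B replaces A's left-to-right dict-increment loop by a divide-and-conquer recursion over index halves.

-- ===== PORT A =====
-- A: start from {'Polecam': 0, 'Nie polecam': 0}; for each rev, try recommends[rev['recommended']] += 1,
-- except: pass (missing 'recommended' key, or a value that is not one of the two dict keys, is ignored).
def get_recommends (json : List (String × List (List (String × String)))) : List (String × Int) :=
  let recommends : PySem.Dict String Int :=
    ((PySem.Dict.empty).insert "Polecam" 0).insert "Nie polecam" 0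
  let reviews := ((PySem.Dict.mk json).get? "item_reviews").getD []
  (reviews.foldl (fun d rev =>
    match (PySem.Dict.mk rev).get? "recommended" with
    | none => d                       -- rev['recommended'] raised KeyError → except: pass
    | some v =>
      match d.get? v with
      | none => d                     -- recommends[v] raised KeyError → except: pass
      | some c => d.insert v (c + 1)) recommends).items

-- ===== PORT B =====
-- B's inner recursion tally(lo, hi): counters for revs[lo:hi] by splitting at the midpoint.
def tallyB (revs : List (List (String × String))) (lo hi : Nat) : Int × Int :=
  if hi - lo = 0 then (0, 0)
  else if hi - lo = 1 then
    match PySem.List.pyGet? revs (lo : Int) with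
    | none => (0, 0)                  -- revs[lo] raised IndexError → except (unreachable from tally(0, len))
    | some rev =>
      match (PySem.Dict.mk rev).get? "recommended" with
      | none => (0, 0)                -- rev['recommended'] raised KeyError → except: return (0, 0)
      | some v => ((if v = "Polecam" then 1 else 0), (if v = "Nie polecam" then 1 else 0))
  else
    let mid := (lo + hi) / 2
    let l := tallyB revs lo mid
    let r := tallyB revs mid hi
    (l.1 + r.1, l.2 + r.2)
termination_by hi - lo
decreasing_by all_goals omega

-- B: revs = list(json['item_reviews']); p, n = tally(0, len(revs)); return the two-entry dict.
def buildB (revs : List (List (String × String))) : List (String × Int) :=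
  match tallyB revs 0 revs.length with
  | (p, n) => [("Polecam", p), ("Nie polecam", n)]

def get_recommends_alt (json : List (String × List (List (String × String)))) : List (String × Int) :=
  buildB (((PySem.Dict.mk json).get? "item_reviews").getD [])

-- ===== PRECONDITION & SPEC =====
-- Pre_ excludes only inputs where Python raises: json['item_reviews'] (outside any try) is a
-- KeyError when the key is absent — both A and B raise there.
def Pre_get_recommends (json : List (String × List (List (String × String)))) : Prop :=
  ((PySem.Dict.mk json).get? "item_reviews").isSome = true
instance (json : List (String × List (List (String × String)))) : Decidable (Pre_get_recommends json) := by unfold Pre_get_recommends; infer_instance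

def pvWitness_get_recommends : (List (String × List (List (String × String)))) :=
  [("item_reviews", [[("recommended", "Polecam")], [("recommended", "Nie polecam")], [("x", "y")]])]

def Spec_get_recommends (json : List (String × List (List (String × String)))) (out : List (String × Int)) : Prop := out = get_recommends_alt json
instance (json : List (String × List (List (String × String)))) (out : List (String × Int)) : Decidable (Spec_get_recommends json out) := by unfold Spec_get_recommends; infer_instance

-- ===== CLAIM (what is proved, stated in full; the proofs are below) =====
def Claim_equal_get_recommends : Prop := ∀ (json : List (String × List (List (String × String)))), Dom_get_recommends json → Pre_get_recommends json → Spec_get_recommends json (get_recommends json)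

-- ===== LEMMAS AND PROOFS =====

-- the pair of counters (Polecam, Nie polecam) over a list of reviews
def gcnt (l : List (List (String × String))) : Int × Int :=
  (((l.filterMap (fun rev => (PySem.Dict.mk rev).get? "recommended")).count "Polecam" : Int),
   ((l.filterMap (fun rev => (PySem.Dict.mk rev).get? "recommended")).count "Nie polecam" : Int))

theorem gcnt_append (x y : List (List (String × String))) :
    gcnt (x ++ y) = ((gcnt x).1 + (gcnt y).1, (gcnt x).2 + (gcnt y).2) := by
  simp [gcnt, List.filterMap_append, List.count_append]

theorem gcnt_singleton (rev : List (String × String)) :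
    gcnt [rev] = match (PySem.Dict.mk rev).get? "recommended" with
      | none => (0, 0)
      | some v => ((if v = "Polecam" then 1 else 0), (if v = "Nie polecam" then 1 else 0)) := by
  cases h : (PySem.Dict.mk rev).get? "recommended" with
  | none => simp [gcnt, List.filterMap, h]
  | some v =>
    simp only [gcnt, List.filterMap, h]
    by_cases hp : v = "Polecam" <;> by_cases hn : v = "Nie polecam" <;>
      simp_all

-- tallyB computes gcnt of the segment revs[lo:hi]
theorem tallyB_eq_gcnt (revs : List (List (String × String))) (lo hi : Nat)
    (h1 : lo ≤ hi) (h2 : hi ≤ revs.length) :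
    tallyB revs lo hi = gcnt ((revs.drop lo).take (hi - lo)) := by
  unfold tallyB
  by_cases h0 : hi - lo = 0
  · simp [h0, gcnt]
  · by_cases hone : hi - lo = 1
    · have hlt : lo < revs.length := by omega
      have hdrop : revs.drop lo = revs[lo] :: revs.drop (lo + 1) :=
        (List.getElem_cons_drop hlt).symm
      have hget : PySem.List.pyGet? revs (lo : Int) = some revs[lo] :=
        PySem.List.pyGet?_ofNat _ lo hlt
      simp only [hone, hget, hdrop, List.take_succ_cons, List.take_zero]
      rw [gcnt_singleton]
      simp
    · have hmid1 : lo ≤ (lo + hi) / 2 := by omega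
      have hmid2 : (lo + hi) / 2 ≤ hi := by omega
      have ihl := tallyB_eq_gcnt revs lo ((lo + hi) / 2) hmid1 (by omega)
      have ihr := tallyB_eq_gcnt revs ((lo + hi) / 2) hi hmid2 h2
      simp only [h0, hone, if_false]
      rw [ihl, ihr]
      have hseg : (revs.drop lo).take (hi - lo)
          = (revs.drop lo).take ((lo + hi) / 2 - lo)
            ++ (revs.drop ((lo + hi) / 2)).take (hi - (lo + hi) / 2) := by
        have hsum : hi - lo = ((lo + hi) / 2 - lo) + (hi - (lo + hi) / 2) := by omega
        rw [hsum, List.take_add, List.drop_drop]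
        have hidx : lo + ((lo + hi) / 2 - lo) = (lo + hi) / 2 := by omega
        rw [hidx]
      rw [hseg, gcnt_append]
termination_by hi - lo
decreasing_by all_goals omega

-- A's fold over the two-key dict, characterised against the gathered values.
theorem foldA_invariant (reviews : List (List (String × String))) (p n : Int) :
    (reviews.foldl (fun d rev =>
      match (PySem.Dict.mk rev).get? "recommended" with
      | none => d
      | some v =>
        match d.get? v with
        | none => d
        | some c => d.insert v (c + 1))
      (PySem.Dict.mk [("Polecam", p), ("Nie polecam", n)])).items
    = [("Polecam", p + (gcnt reviews).1), ("Nie polecam", n + (gcnt reviews).2)] := by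
  induction reviews generalizing p n with
  | nil => simp [gcnt]
  | cons rev rest ih =>
    simp only [List.foldl_cons, gcnt, List.filterMap_cons]
    cases h : (PySem.Dict.mk rev).get? "recommended" with
    | none => simpa [gcnt] using ih p n
    | some v =>
      by_cases hp : v = "Polecam"
      · subst hp
        have hget : (PySem.Dict.mk [("Polecam", p), ("Nie polecam", n)]).get? "Polecam" = some p := by
          simp [PySem.Dict.get?_mk_cons]
        have hins : (PySem.Dict.mk [("Polecam", p), ("Nie polecam", n)]).insert "Polecam" (p + 1)
            = PySem.Dict.mk [("Polecam", p + 1), ("Nie polecam", n)] := by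
          apply PySem.Dict.ext
          simp [PySem.Dict.items_insert, PySem.Dict.contains_mk]
        simp only [hget, hins, ih, gcnt]
        simp
        omega
      · by_cases hn : v = "Nie polecam"
        · subst hn
          have hget : (PySem.Dict.mk [("Polecam", p), ("Nie polecam", n)]).get? "Nie polecam" = some n := by
            simp [PySem.Dict.get?_mk_cons]
          have hins : (PySem.Dict.mk [("Polecam", p), ("Nie polecam", n)]).insert "Nie polecam" (n + 1)
              = PySem.Dict.mk [("Polecam", p), ("Nie polecam", n + 1)] := by
            apply PySem.Dict.ext
            simp [PySem.Dict.items_insert, PySem.Dict.contains_mk]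
          simp only [hget, hins, ih, gcnt]
          simp
          omega
        · have hget : (PySem.Dict.mk [("Polecam", p), ("Nie polecam", n)]).get? v = none := by
            simp [Ne.symm hp, Ne.symm hn, PySem.Dict.get?]
          simp only [hget, ih, gcnt]
          simp [hp, hn]

-- ===== VERDICT (by name: the statement is the Claim_ definition above) =====
theorem get_recommends_spec : Claim_equal_get_recommends := by
  intro json _ _
  unfold Spec_get_recommends get_recommends get_recommends_alt buildB
  have hinit : ((PySem.Dict.empty).insert "Polecam" (0 : Int)).insert "Nie polecam" 0
      = PySem.Dict.mk [("Polecam", 0), ("Nie polecam", 0)] := by decide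
  rw [hinit, foldA_invariant,
      tallyB_eq_gcnt _ 0 _ (Nat.zero_le _) le_rfl]
  simp [gcnt]
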